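-- pv_equiv track=rewrite | github.com/fimenten/atcoder | 146/D.py | what_colour
-- ===== SOURCE A (Python) =====
-- def what_colour(cc,a_bit,b_bit):
--     i=1
--     while True:
--         if (2**i&a_bit!=0) or (2**i&b_bit!=0):
--             i=i+1
--             continue
--         else:
--             return i,max(cc,i)
-- ===== SOURCE B (Python) =====
-- def what_colour(cc, a_bit, b_bit):
--     d = (a_bit | b_bit) | 1
--     p = ~d & (d + 1)
--     i = p.bit_length() - 1
--     return i, max(cc, i)
-- ===== Notes on version B (the rewrite author's own statement) =====
-- stated objective: simpler
-- what changed: replaces the bit-by-bit scanning while loop (recomputing 2**i each iteration) by a closed-form lowest-zero-bit computation on the combined mask d=(a_bit|b_bit)|1: p=~d&(d+1) isolates the lowest zero bit and p.bit_length()-1 is its index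
import Mathlib
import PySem

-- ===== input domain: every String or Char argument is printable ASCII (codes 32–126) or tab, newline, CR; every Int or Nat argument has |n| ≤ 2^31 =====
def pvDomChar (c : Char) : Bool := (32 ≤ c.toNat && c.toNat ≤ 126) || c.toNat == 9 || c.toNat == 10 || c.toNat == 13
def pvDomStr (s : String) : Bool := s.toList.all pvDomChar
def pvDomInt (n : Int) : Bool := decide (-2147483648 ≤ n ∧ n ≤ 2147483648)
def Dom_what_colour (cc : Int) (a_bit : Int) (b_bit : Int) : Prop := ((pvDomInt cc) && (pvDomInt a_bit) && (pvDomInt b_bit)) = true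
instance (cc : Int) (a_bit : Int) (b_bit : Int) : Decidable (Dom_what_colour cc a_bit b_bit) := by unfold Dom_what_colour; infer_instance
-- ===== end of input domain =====

-- B replaces A's bit-scanning while loop by the closed-form lowest-zero-bit trick
-- p = ~d & (d+1) on the combined mask d = (a_bit|b_bit)|1, then i = p.bit_length()-1.


-- ===== PORT A =====
-- A's 'while True' is ported with fuel 64: under Dom ∧ Pre the loop is proved below to
-- stop at i ≤ 34, so the fuel-exhausted fallback is never reached on the claimed domain.
def whatColourGo (cc : Int) (a_bit : Int) (b_bit : Int) : Nat → Nat → Int × Int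
  | 0, i => ((i : Int), max cc (i : Int))
  | fuel+1, i =>
    if PySem.Int.band ((2:Int)^i) a_bit ≠ 0 ∨ PySem.Int.band ((2:Int)^i) b_bit ≠ 0 then
      whatColourGo cc a_bit b_bit fuel (i+1)
    else ((i : Int), max cc (i : Int))

def what_colour (cc : Int) (a_bit : Int) (b_bit : Int) : Int × Int :=
  whatColourGo cc a_bit b_bit 64 1

-- ===== PORT B =====
def what_colour_alt (cc : Int) (a_bit : Int) (b_bit : Int) : Int × Int :=
  let d := PySem.Int.bor (PySem.Int.bor a_bit b_bit) 1
  let p := PySem.Int.band (Int.not d) (d + 1)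
  let i : Int := (PySem.Int.bitLength p : Int) - 1
  (i, max cc i)

-- ===== PRECONDITION & SPEC =====
-- Pre_ excludes exactly the inputs on which A never returns: when every bit i ≥ 1 of
-- a_bit|b_bit is set (i.e. (a_bit|b_bit)|1 == -1), A's while loop runs forever.
def Pre_what_colour (cc : Int) (a_bit : Int) (b_bit : Int) : Prop :=
  PySem.Int.bor (PySem.Int.bor a_bit b_bit) 1 ≠ -1
instance (cc : Int) (a_bit : Int) (b_bit : Int) : Decidable (Pre_what_colour cc a_bit b_bit) := by unfold Pre_what_colour; infer_instance

def pvWitness_what_colour : Int × Int × Int := (5, 6, 3)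

def Spec_what_colour (cc : Int) (a_bit : Int) (b_bit : Int) (out : Int × Int) : Prop := out = what_colour_alt cc a_bit b_bit
instance (cc : Int) (a_bit : Int) (b_bit : Int) (out : Int × Int) : Decidable (Spec_what_colour cc a_bit b_bit out) := by unfold Spec_what_colour; infer_instance

-- ===== CLAIM (what is proved, stated in full; the proofs are below) =====
def Claim_equal_what_colour : Prop := ∀ (cc : Int) (a_bit : Int) (b_bit : Int), Dom_what_colour cc a_bit b_bit → Pre_what_colour cc a_bit b_bit → Spec_what_colour cc a_bit b_bit (what_colour cc a_bit b_bit)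

-- ===== LEMMAS AND PROOFS =====

-- bit groundwork on Nat
theorem pvAndAddLdiff (m n : Nat) : (m &&& n) + m.ldiff n = m := by
  induction m using Nat.binaryRec generalizing n with
  | zero => simp [Nat.ldiff]
  | bit b m ih =>
    rw [← Nat.bit_testBit_zero_shiftRight_one (n := n), Nat.land_bit, Nat.ldiff_bit,
      Nat.bit_val, Nat.bit_val, Nat.bit_val]
    have := ih (n >>> 1)
    cases b <;> cases n.testBit 0 <;> simp at * <;> omega

theorem pvSubAndEqLdiff (m n : Nat) : m - (m &&& n) = m.ldiff n := by
  have h1 := pvAndAddLdiff m n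
  omega

theorem pvLorLeAdd (m n : Nat) : m ||| n ≤ m + n := by
  induction m using Nat.binaryRec generalizing n with
  | zero => simp
  | bit b m ih =>
    rw [← Nat.bit_testBit_zero_shiftRight_one (n := n), Nat.lor_bit,
      Nat.bit_val, Nat.bit_val, Nat.bit_val]
    have := ih (n >>> 1)
    cases b <;> cases n.testBit 0 <;> simp at * <;> omega

-- bridges between PySem's Python-exact bitwise ops and Mathlib's Int.land/lor
theorem pvBandEqLand (a b : Int) : PySem.Int.band a b = Int.land a b := by
  unfold PySem.Int.band Int.land
  rcases a with m | m <;> rcases b with n | n <;> simp [Int.toNat]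
  · exact pvSubAndEqLdiff m n
  · exact pvSubAndEqLdiff n m
  · rw [Int.negSucc_eq]; ring

theorem pvBorEqLor (a b : Int) : PySem.Int.bor a b = Int.lor a b := by
  unfold PySem.Int.bor Int.lor
  rcases a with m | m <;> rcases b with n | n <;> simp [Int.toNat]
  · rw [pvSubAndEqLdiff, Int.negSucc_eq]; ring
  · rw [pvSubAndEqLdiff, Int.negSucc_eq]; ring
  · rw [Int.negSucc_eq]; ring

theorem pvTestBitOfNat (n k : Nat) : Int.testBit (Int.ofNat n) k = n.testBit k := rfl
theorem pvTestBitNegSucc (n k : Nat) : Int.testBit (Int.negSucc n) k = !(n.testBit k) := rfl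

-- the loop's condition reads exactly bit i of x
theorem pvBandTwoPowNe (x : Int) (i : Nat) :
    (PySem.Int.band ((2:Int)^i) x ≠ 0) ↔ x.testBit i = true := by
  rw [pvBandEqLand]
  have h2 : ((2:Int)^i) = Int.ofNat (2^i) := by rw [Int.ofNat_eq_natCast]; push_cast; ring
  rw [h2]
  rcases x with n | n
  · show ((((2^i) &&& n : Nat) : Int) ≠ 0) ↔ _
    rw [Nat.two_pow_and, pvTestBitOfNat]
    cases h : n.testBit i <;> simp
  · show ((((2^i).ldiff n : Nat) : Int) ≠ 0) ↔ _
    rw [pvTestBitNegSucc]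
    have hld : (2^i).ldiff n = 2^i * (!n.testBit i).toNat := by
      apply Nat.eq_of_testBit_eq
      intro j
      rw [Nat.testBit_ldiff, Nat.testBit_two_pow]
      cases h : n.testBit i
      · simp only [Bool.toNat]
        by_cases hij : i = j
        · subst hij; simp [h]
        · simp [hij]
      · simp only [Bool.toNat]
        by_cases hij : i = j
        · subst hij; simp [h]
        · simp [hij]
    rw [hld]
    cases h : n.testBit i <;> simp

-- every positive Nat splits off its lowest set bit
theorem pvExistsLowbit (m : Nat) (hm : 0 < m) : ∃ k e, m = 2^(k+1) * e + 2^k := by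
  induction m using Nat.strong_induction_on with
  | _ m ih =>
    rcases Nat.even_or_odd m with ⟨m', hm'⟩ | ⟨m', hm'⟩
    · have hm'pos : 0 < m' := by omega
      obtain ⟨k, e, hke⟩ := ih m' (by omega) hm'pos
      exact ⟨k + 1, e, by rw [hm', hke]; ring⟩
    · exact ⟨0, m', by rw [hm']; ring⟩

-- bits of the two standard shapes
theorem pvBitsHigh (k e j : Nat) (hj : j < k) : (2^(k+1) * e + 2^k).testBit j = false := by
  have hb : (2^k : Nat) < 2^(k+1) := by
    exact Nat.pow_lt_pow_right (by norm_num) (by omega)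
  rw [Nat.testBit_two_pow_mul_add e hb, if_pos (by omega), Nat.testBit_two_pow]
  simp; omega

theorem pvBitsHighK (k e : Nat) : (2^(k+1) * e + 2^k).testBit k = true := by
  have hb : (2^k : Nat) < 2^(k+1) := Nat.pow_lt_pow_right (by norm_num) (by omega)
  rw [Nat.testBit_two_pow_mul_add e hb, if_pos (by omega), Nat.testBit_two_pow]
  simp

theorem pvBitsPred (k e j : Nat) (hj : j < k) : (2^(k+1) * e + 2^k - 1).testBit j = true := by
  have h1 : (0:Nat) < 2^k := Nat.two_pow_pos k
  have hb : (2^k - 1 : Nat) < 2^(k+1) := by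
    have := Nat.pow_lt_pow_right (a := 2) (by norm_num) (show k < k+1 by omega)
    omega
  have heq : 2^(k+1) * e + 2^k - 1 = 2^(k+1) * e + (2^k - 1) := by omega
  rw [heq, Nat.testBit_two_pow_mul_add e hb, if_pos (by omega), Nat.testBit_two_pow_sub_one]
  simp; omega

theorem pvBitsPredK (k e : Nat) : (2^(k+1) * e + 2^k - 1).testBit k = false := by
  have h1 : (0:Nat) < 2^k := Nat.two_pow_pos k
  have hb : (2^k - 1 : Nat) < 2^(k+1) := by
    have := Nat.pow_lt_pow_right (a := 2) (by norm_num) (show k < k+1 by omega)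
    omega
  have heq : 2^(k+1) * e + 2^k - 1 = 2^(k+1) * e + (2^k - 1) := by omega
  rw [heq, Nat.testBit_two_pow_mul_add e hb, if_pos (by omega), Nat.testBit_two_pow_sub_one]
  simp

-- the lowest-zero-bit trick, Nat level: (n+1) ldiff n and m ldiff (m-1)
theorem pvLdiffSucc (k e : Nat) :
    (2^(k+1) * e + 2^k).ldiff (2^(k+1) * e + 2^k - 1) = 2^k := by
  have h1 : (0:Nat) < 2^k := Nat.two_pow_pos k
  have hb1 : (2^k : Nat) < 2^(k+1) := Nat.pow_lt_pow_right (by norm_num) (by omega)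
  have hb0 : (2^k - 1 : Nat) < 2^(k+1) := by omega
  have heq : 2^(k+1) * e + 2^k - 1 = 2^(k+1) * e + (2^k - 1) := by omega
  apply Nat.eq_of_testBit_eq
  intro j
  rw [Nat.testBit_ldiff, heq, Nat.testBit_two_pow_mul_add e hb1,
    Nat.testBit_two_pow_mul_add e hb0, Nat.testBit_two_pow]
  by_cases hj : j < k + 1
  · rw [if_pos hj, if_pos hj, Nat.testBit_two_pow_sub_one]
    by_cases hjk : j = k <;> simp [hjk] <;> omega
  · rw [if_neg hj, if_neg hj]
    cases e.testBit (j - (k+1)) <;> simp <;> omega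

-- bitLength of a power of two
theorem pvBitLengthPow (k : Nat) : PySem.Int.bitLength ((2^k : Nat) : Int) = k + 1 := by
  induction k with
  | zero => norm_num; decide
  | succ k ih =>
    rw [PySem.Int.bitLength_natCast (by positivity)]
    have : 2^(k+1) / 2 = 2^k := by
      rw [pow_succ, Nat.mul_div_cancel _ (by norm_num)]
    rw [this, ih]

-- magnitude bound for Int.lor
theorem pvNatAbsLorLe (x y : Int) : (Int.lor x y).natAbs ≤ x.natAbs + y.natAbs + 1 := by
  rcases x with m | m <;> rcases y with n | n <;> simp [Int.lor, Int.natAbs]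
  · calc m ||| n ≤ m + n := pvLorLeAdd m n
      _ ≤ m + n + 1 := by omega
  · have := pvAndAddLdiff n m; omega
  · have := pvAndAddLdiff m n; omega
  · have := Nat.and_le_left (n := m) (m := n); omega

-- A's loop returns (k, max cc k) when k is the first index ≥ 1 where both bits are clear
theorem pvGoEq (cc a b : Int) (k : Nat)
    (hrun : ∀ j, 1 ≤ j → j < k → (a.testBit j || b.testBit j) = true)
    (hstopa : a.testBit k = false) (hstopb : b.testBit k = false) :
    ∀ fuel i, 1 ≤ i → i ≤ k → k < i + fuel →
      whatColourGo cc a b fuel i = ((k : Int), max cc (k : Int)) := by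
  intro fuel
  induction fuel with
  | zero => intro i _ h2 h3; omega
  | succ f ih =>
    intro i h1 h2 h3
    show (if PySem.Int.band ((2:Int)^i) a ≠ 0 ∨ PySem.Int.band ((2:Int)^i) b ≠ 0 then
      whatColourGo cc a b f (i+1) else ((i : Int), max cc (i : Int))) = _
    by_cases hik : i = k
    · subst hik
      rw [if_neg]
      rintro (h | h)
      · rw [pvBandTwoPowNe] at h; simp [hstopa] at h
      · rw [pvBandTwoPowNe] at h; simp [hstopb] at h
    · have hlt : i < k := by omega
      have hcond := hrun i h1 hlt
      rw [if_pos]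
      · exact ih (i+1) (by omega) (by omega) (by omega)
      · rcases Bool.or_eq_true_iff.mp hcond with h | h
        · exact Or.inl ((pvBandTwoPowNe a i).mpr h)
        · exact Or.inr ((pvBandTwoPowNe b i).mpr h)

-- value of B's port once p is known to be 2^k
theorem pvAltVal (cc a b : Int) (k : Nat)
    (hp : PySem.Int.band (Int.not (PySem.Int.bor (PySem.Int.bor a b) 1)) ((PySem.Int.bor (PySem.Int.bor a b) 1) + 1) = ((2^k : Nat) : Int)) :
    what_colour_alt cc a b = ((k : Int), max cc (k : Int)) := by
  unfold what_colour_alt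
  simp only [hp, pvBitLengthPow]
  push_cast
  norm_num

-- main equivalence
theorem pvMain (cc a b : Int) (hDom : Dom_what_colour cc a b) (hPre : Pre_what_colour cc a b) :
    what_colour cc a b = what_colour_alt cc a b := by
  unfold Dom_what_colour pvDomInt at hDom
  simp only [Bool.and_eq_true, decide_eq_true_eq] at hDom
  obtain ⟨⟨_, hA⟩, hB⟩ := hDom
  unfold Pre_what_colour at hPre
  unfold what_colour
  set d := PySem.Int.bor (PySem.Int.bor a b) 1 with hd
  have hd' : d = Int.lor (Int.lor a b) 1 := by rw [hd, pvBorEqLor, pvBorEqLor]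
  have hdbit : ∀ j, 1 ≤ j → d.testBit j = (a.testBit j || b.testBit j) := by
    intro j hj
    rw [hd', Int.testBit_lor, Int.testBit_lor]
    have h1 : (1 : Int).testBit j = false := by
      show (1 : Nat).testBit j = false
      have : (1 : Nat) = 2^0 := by norm_num
      rw [this, Nat.testBit_two_pow]; simp; omega
    rw [h1, Bool.or_false]
  have hdbit0 : d.testBit 0 = true := by
    rw [hd', Int.testBit_lor]
    have h1 : (1 : Int).testBit 0 = true := rfl
    rw [h1, Bool.or_true]
  have hdabs : d.natAbs ≤ 8589934592 := by
    have h1 := pvNatAbsLorLe (Int.lor a b) 1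
    have h2 := pvNatAbsLorLe a b
    rw [← hd'] at h1
    have hone : (1 : Int).natAbs = 1 := rfl
    rw [hone] at h1
    have ha' : a.natAbs ≤ 2147483648 := by omega
    have hb' : b.natAbs ≤ 2147483648 := by omega
    omega
  -- common continuation: once d's bits are characterised and p = 2^k, both sides give (k, max cc k)
  rcases hdc : d with n | m
  · -- d = n ≥ 0, n odd; trailing-ones shape: n + 1 = 2^(k+1)e + 2^k
    have hn0 : n ≠ 0 := by
      intro h; rw [hdc, h, pvTestBitOfNat] at hdbit0; simp at hdbit0
    obtain ⟨k, e, hke⟩ := pvExistsLowbit (n + 1) (by omega)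
    have h2k : (0:Nat) < 2^k := Nat.two_pow_pos k
    have hn : n = 2^(k+1) * e + 2^k - 1 := by omega
    have hbitlow : ∀ j, j < k → d.testBit j = true := by
      intro j hj; rw [hdc, pvTestBitOfNat, hn]; exact pvBitsPred k e j hj
    have hbitk : d.testBit k = false := by
      rw [hdc, pvTestBitOfNat, hn]; exact pvBitsPredK k e
    have hk1 : 1 ≤ k := by
      rcases Nat.eq_zero_or_pos k with h | h
      · rw [h] at hbitk; rw [hbitk] at hdbit0; exact absurd hdbit0 (by simp)
      · exact h
    have hkbound : k < 34 := by
      have hle : (2:Nat)^k ≤ n + 1 := by omega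
      have h34 : n + 1 ≤ 8589934593 := by
        have : d.natAbs = n := by rw [hdc]; rfl
        omega
      have hpow : (2:Nat)^34 = 17179869184 := by norm_num
      have : (2:Nat)^k < 2^34 := by rw [hpow]; omega
      exact (Nat.pow_lt_pow_iff_right (by norm_num)).mp this
    -- A side
    have hstop : a.testBit k = false ∧ b.testBit k = false := by
      have := hdbit k hk1
      rw [hbitk] at this
      constructor <;> [cases h : a.testBit k; cases h : b.testBit k] <;>
        simp [h] at this ⊢
    have hA' := pvGoEq cc a b k
      (fun j h1 h2 => by rw [← hdbit j h1]; exact hbitlow j h2)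
      hstop.1 hstop.2 64 1 le_rfl (by omega) (by omega)
    rw [hA']
    -- B side
    have hnot : Int.not d = Int.negSucc n := by rw [hdc]; rfl
    have hsucc : d + 1 = Int.ofNat (n + 1) := by
      rw [hdc]; rw [Int.ofNat_eq_natCast, Int.ofNat_eq_natCast]; push_cast; ring
    have hp : PySem.Int.band (Int.not d) (d + 1) = ((2^k : Nat) : Int) := by
      rw [pvBandEqLand, hnot, hsucc]
      show ((((n+1).ldiff n : Nat)) : Int) = _
      rw [hke, hn, pvLdiffSucc k e]
    exact (pvAltVal cc a b k (by rw [← hd]; exact hp)).symm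
  · -- d = negSucc m, m ≥ 1 even; lowest set bit of m at k: m = 2^(k+1)e + 2^k
    have hm0 : m ≠ 0 := by
      intro h; rw [hdc, h] at hPre; exact hPre rfl
    obtain ⟨k, e, hke⟩ := pvExistsLowbit m (by omega)
    have h2k : (0:Nat) < 2^k := Nat.two_pow_pos k
    have hbitlow : ∀ j, j < k → d.testBit j = true := by
      intro j hj; rw [hdc, pvTestBitNegSucc, hke, pvBitsHigh k e j hj]; rfl
    have hbitk : d.testBit k = false := by
      rw [hdc, pvTestBitNegSucc, hke, pvBitsHighK k e]; rfl
    have hk1 : 1 ≤ k := by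
      rcases Nat.eq_zero_or_pos k with h | h
      · rw [h] at hbitk; rw [hbitk] at hdbit0; exact absurd hdbit0 (by simp)
      · exact h
    have hkbound : k < 34 := by
      have hle : (2:Nat)^k ≤ m := by omega
      have h34 : m ≤ 8589934592 := by
        have : d.natAbs = m + 1 := by rw [hdc]; rfl
        omega
      have hpow : (2:Nat)^34 = 17179869184 := by norm_num
      have : (2:Nat)^k < 2^34 := by rw [hpow]; omega
      exact (Nat.pow_lt_pow_iff_right (by norm_num)).mp this
    have hstop : a.testBit k = false ∧ b.testBit k = false := by
      have := hdbit k hk1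
      rw [hbitk] at this
      constructor <;> [cases h : a.testBit k; cases h : b.testBit k] <;>
        simp [h] at this ⊢
    have hA' := pvGoEq cc a b k
      (fun j h1 h2 => by rw [← hdbit j h1]; exact hbitlow j h2)
      hstop.1 hstop.2 64 1 le_rfl (by omega) (by omega)
    rw [hA']
    have hnot : Int.not d = Int.ofNat m := by rw [hdc]; rfl
    have hsucc : d + 1 = Int.negSucc (m - 1) := by
      rw [hdc, Int.negSucc_eq, Int.negSucc_eq]; omega
    have hp : PySem.Int.band (Int.not d) (d + 1) = ((2^k : Nat) : Int) := by
      rw [pvBandEqLand, hnot, hsucc]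
      show (((m.ldiff (m-1) : Nat)) : Int) = _
      rw [hke, pvLdiffSucc k e]
    exact (pvAltVal cc a b k (by rw [← hd]; exact hp)).symm

-- ===== VERDICT (by name: the statement is the Claim_ definition above) =====
theorem what_colour_spec : Claim_equal_what_colour := by
  intro cc a b hDom hPre
  unfold Spec_what_colour
  exact pvMain cc a b hDom hPre
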